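-- pv_equiv track=rewrite | github.com/zengbohan0217/OpenWorldLib | src/openworldlib/operators/flash_world_operator.py | _segment_frame_counts
-- ===== SOURCE A (Python) =====
-- from typing import List, Optional, Union, Dict, Any
--
-- def _segment_frame_counts(num_frames: int, n_segments: int) -> List[int]:
--     """Split num_frames into n_segments contiguous parts (>=1 each when num_frames >= n_segments)."""
--     if n_segments <= 0:
--         return []
--     if num_frames < n_segments:
--         n_segments = num_frames
--     base = num_frames // n_segments
--     rem = num_frames % n_segments
--     return [base + (1 if i < rem else 0) for i in range(n_segments)]
-- ===== SOURCE B (Python) =====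
-- def _segment_frame_counts(num_frames: int, n_segments: int):
--     """Split num_frames into n_segments contiguous parts (>=1 each when num_frames >= n_segments)."""
--     if n_segments <= 0:
--         return []
--     if num_frames < n_segments:
--         n_segments = num_frames
--     counts = []
--     remaining = num_frames
--     segs_left = n_segments
--     for _ in range(n_segments):
--         size = -(-remaining // segs_left)  # integer ceil division
--         counts.append(size)
--         remaining -= size
--         segs_left -= 1
--     return counts
-- ===== Notes on version B (the rewrite author's own statement) =====
-- stated objective: alternative
-- what changed: Replaces the precomputed base/remainder comprehension with a greedy one-pass loop that repeatedly takes the ceiling of remaining/segments-left and subtracts it.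
import Mathlib
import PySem

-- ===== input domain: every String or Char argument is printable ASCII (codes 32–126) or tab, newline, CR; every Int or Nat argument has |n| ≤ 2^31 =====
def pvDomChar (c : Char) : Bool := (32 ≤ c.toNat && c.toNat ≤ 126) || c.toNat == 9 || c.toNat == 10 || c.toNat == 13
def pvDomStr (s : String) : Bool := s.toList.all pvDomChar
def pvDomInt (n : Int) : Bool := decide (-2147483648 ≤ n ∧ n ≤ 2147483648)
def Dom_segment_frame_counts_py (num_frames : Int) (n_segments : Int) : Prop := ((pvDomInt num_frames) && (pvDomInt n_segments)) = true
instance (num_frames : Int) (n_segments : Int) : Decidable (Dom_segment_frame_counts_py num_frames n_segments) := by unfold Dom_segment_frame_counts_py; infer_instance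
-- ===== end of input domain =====

-- B replaces A's precomputed base/remainder comprehension by a greedy one-pass loop on the
-- running remainder (ceiling division by the segments left); same cost, different decomposition.

-- ===== PORT A =====
def segment_frame_counts_py (num_frames : Int) (n_segments : Int) : List Int :=
  if n_segments ≤ 0 then []
  else
    let n := if num_frames < n_segments then num_frames else n_segments
    let base := PySem.Int.floordiv num_frames n
    let rem := PySem.Int.mod num_frames n
    (PySem.List.pyRange 0 n 1).map (fun i => base + (if i < rem then 1 else 0))

-- ===== PORT B =====
-- the 'for _ in range(n_segments)' loop of Source B: trip count n.toNat = len(range(n)),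
-- state (remaining, segs_left); each step takes size = -((-remaining) // segs_left)
def pvAltLoop : Nat → Int → Int → List Int
  | 0, _, _ => []
  | Nat.succ k, remaining, segs_left =>
    let size := -(PySem.Int.floordiv (-remaining) segs_left)
    size :: pvAltLoop k (remaining - size) (segs_left - 1)

def segment_frame_counts_py_alt (num_frames : Int) (n_segments : Int) : List Int :=
  if n_segments ≤ 0 then []
  else
    let n := if num_frames < n_segments then num_frames else n_segments
    pvAltLoop n.toNat num_frames n

-- ===== PRECONDITION & SPEC =====
-- Pre_ excludes exactly the inputs where A raises ZeroDivisionError (num_frames == 0 with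
-- n_segments > 0: after the reassignment A divides by 0).
def Pre_segment_frame_counts_py (num_frames : Int) (n_segments : Int) : Prop :=
  ¬ (num_frames = 0 ∧ 0 < n_segments)
instance (num_frames : Int) (n_segments : Int) : Decidable (Pre_segment_frame_counts_py num_frames n_segments) := by unfold Pre_segment_frame_counts_py; infer_instance

def pvWitness_segment_frame_counts_py : Int × Int := (7, 3)

def Spec_segment_frame_counts_py (num_frames : Int) (n_segments : Int) (out : List Int) : Prop := out = segment_frame_counts_py_alt num_frames n_segments
instance (num_frames : Int) (n_segments : Int) (out : List Int) : Decidable (Spec_segment_frame_counts_py num_frames n_segments out) := by unfold Spec_segment_frame_counts_py; infer_instance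

-- ===== CLAIM (what is proved, stated in full; the proofs are below) =====
def Claim_equal_segment_frame_counts_py : Prop := ∀ (num_frames : Int) (n_segments : Int), Dom_segment_frame_counts_py num_frames n_segments → Pre_segment_frame_counts_py num_frames n_segments → Spec_segment_frame_counts_py num_frames n_segments (segment_frame_counts_py num_frames n_segments)

-- ===== LEMMAS AND PROOFS =====

-- greedy loop with segs_left = K produces the front-loaded balanced list of r over K parts
lemma pvGreedy : ∀ (K : Nat) (r : Int),
    pvAltLoop K r (K : Int) =
      (List.range K).map
        (fun i : Nat => PySem.Int.floordiv r (K : Int) + if (i : Int) < PySem.Int.mod r (K : Int) then 1 else 0) := by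
  intro K
  induction K with
  | zero => intro r; simp [pvAltLoop]
  | succ k ih =>
    intro r
    have hpos : (0 : Int) < ((k + 1 : Nat) : Int) := by positivity
    set b := PySem.Int.floordiv r ((k + 1 : Nat) : Int) with hb
    set m := PySem.Int.mod r ((k + 1 : Nat) : Int) with hm
    have hsum : b * ((k + 1 : Nat) : Int) + m = r := PySem.Int.floordiv_mul_add_mod r _
    have hm0 : 0 ≤ m := PySem.Int.mod_nonneg r hpos
    have hmlt : m < ((k + 1 : Nat) : Int) := PySem.Int.mod_lt r hpos
    -- the first greedy size is b + [m > 0]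
    have hsize : -(PySem.Int.floordiv (-r) ((k + 1 : Nat) : Int)) = b + (if 0 < m then 1 else 0) := by
      rw [PySem.Int.neg_floordiv_neg_eq_iff_of_pos hpos]
      by_cases h0 : 0 < m <;> · simp only [h0, if_true, if_false]; constructor <;> nlinarith
    have hseg : ((k + 1 : Nat) : Int) - 1 = (k : Int) := by push_cast; ring
    have hcast : ∀ i : Nat, ((i + 1 : Nat) : Int) = (i : Int) + 1 := by intro i; push_cast; ring
    by_cases h0 : 0 < m
    · -- m > 0 (hence k ≥ 1): remainder becomes b*k + (m-1)
      have hk1 : 1 ≤ k := by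
        by_contra hk
        interval_cases k <;> omega
      have hkpos : (0 : Int) < (k : Int) := by exact_mod_cast hk1
      have hr' : r - (b + 1) = b * (k : Int) + (m - 1) := by push_cast at hsum ⊢; nlinarith
      have hfd : PySem.Int.floordiv (r - (b + 1)) (k : Int) = b := by
        rw [PySem.Int.floordiv_eq_iff_of_pos hkpos]
        constructor <;> nlinarith
      have hmd : PySem.Int.mod (r - (b + 1)) (k : Int) = m - 1 := by
        have := PySem.Int.floordiv_mul_add_mod (r - (b + 1)) (k : Int)
        rw [hfd] at this; omega
      simp only [pvAltLoop, hsize, h0, if_true, List.range_succ_eq_map, List.map_cons,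
        List.map_map, hseg]
      rw [ih (r - (b + 1)), hfd, hmd]
      refine congrArg₂ _ (by simp [h0]) ?_
      apply List.map_congr_left
      intro i _
      simp only [Function.comp_apply, Nat.succ_eq_add_one, hcast]
      by_cases hi : (i : Int) < m - 1
      · rw [if_pos hi, if_pos (by omega)]
      · rw [if_neg hi, if_neg (by omega)]
    · -- m = 0: remainder becomes b*k
      have hm' : m = 0 := by omega
      have hr' : r - b = b * (k : Int) := by push_cast at hsum ⊢; nlinarith
      simp only [pvAltLoop, hsize, h0, if_false, add_zero, List.range_succ_eq_map,
        List.map_cons, List.map_map, hseg]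
      rcases Nat.eq_zero_or_pos k with hk | hk
      · subst hk
        simp [hm', pvAltLoop]
      · have hkpos : (0 : Int) < (k : Int) := by exact_mod_cast hk
        have hfd : PySem.Int.floordiv (r - b) (k : Int) = b := by
          rw [PySem.Int.floordiv_eq_iff_of_pos hkpos]
          constructor <;> nlinarith
        have hmd : PySem.Int.mod (r - b) (k : Int) = 0 := by
          have := PySem.Int.floordiv_mul_add_mod (r - b) (k : Int)
          rw [hfd] at this; omega
        rw [ih (r - b), hfd, hmd]
        refine congrArg₂ _ (by simp [hm']) ?_
        apply List.map_congr_left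
        intro i _
        simp only [Function.comp_apply, Nat.succ_eq_add_one, hcast, hm']
        rw [if_neg (by omega), if_neg (by omega)]

-- ===== VERDICT (by name: the statement is the Claim_ definition above) =====
theorem segment_frame_counts_py_spec : Claim_equal_segment_frame_counts_py := by
  unfold Claim_equal_segment_frame_counts_py Spec_segment_frame_counts_py
    Pre_segment_frame_counts_py Dom_segment_frame_counts_py
  intro num_frames n_segments _ hpre
  unfold segment_frame_counts_py segment_frame_counts_py_alt
  by_cases hg : n_segments ≤ 0
  · simp [hg]
  · simp only [hg, if_false]
    set n := if num_frames < n_segments then num_frames else n_segments with hn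
    by_cases hle : n ≤ 0
    · rw [PySem.List.pyRange_one_eq_nil hle]
      have : n.toNat = 0 := Int.toNat_of_nonpos hle
      simp [this, pvAltLoop]
    · have hpos : (0:Int) < n := by omega
      have hK : ((n.toNat : Nat) : Int) = n := Int.toNat_of_nonneg hpos.le
      rw [← hK, Int.toNat_natCast, pvGreedy n.toNat num_frames, PySem.List.pyRange_one]
      simp only [sub_zero, Int.toNat_natCast, List.map_map]
      apply List.map_congr_left
      intro i _
      simp
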